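-- pv_equiv track=rewrite | github.com/Arrrlex/rust-graph-algos | python/dfs.py | dfs
-- ===== SOURCE A (Python) =====
-- from typing import Hashable, TypeVar
--
-- A = TypeVar("A", bound=Hashable)
--
-- B = TypeVar("B", bound=Hashable)
--
-- def dfs(network: list[tuple[A, B]]):
--     """Compute connected components using depth-first search."""
--     # Build adjacency list.
--     adj = {}
--     for a, b in network:
--         adj.setdefault(a, set()).add(b)
--         adj.setdefault(b, set()).add(a)
--
--     # Run DFS.
--     visited = set()
--     ccs = []
--     for node in adj:
--         if node not in visited:
--             cc = set()
--             stack = [node]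
--             while stack:
--                 node = stack.pop()
--                 if node not in visited:
--                     visited.add(node)
--                     cc.add(node)
--                     stack.extend(adj[node])
--             ccs.append(cc)
--
--     a_nodes = {a for a, _ in network}
--     return [{n for n in cc if n in a_nodes} for cc in ccs]
-- ===== SOURCE B (Python) =====
-- def dfs(network):
--     """Connected components (filtered to left-endpoint nodes) by min-label
--     propagation: every node repeatedly adopts the smaller label across each
--     edge until a fixpoint, then nodes are grouped by their final label."""
--     # Nodes in first-appearance order.
--     nodes = []
--     seen = set()
--     for a, b in network:
--         for v in (a, b):
--             if v not in seen:
--                 seen.add(v)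
--                 nodes.append(v)
--
--     labels = {v: v for v in nodes}
--     changed = True
--     while changed:
--         changed = False
--         for a, b in network + network[::-1]:
--             la, lb = labels[a], labels[b]
--             if la != lb:
--                 labels[a] = labels[b] = min(la, lb)
--                 changed = True
--
--     byroot = {}
--     for v in nodes:
--         byroot.setdefault(labels[v], []).append(v)
--
--     a_nodes = {a for a, _ in network}
--     return [{x for x in c if x in a_nodes} for c in byroot.values()]
-- ===== Notes on version B (the rewrite author's own statement) =====
-- stated objective: alternative
-- what changed: B replaces A's stack-based DFS over an adjacency dict by min-label propagation: every node starts labelled with itself, bidirectional sweeps over the edge list repeatedly give both endpoints of each edge the smaller label until a fixpoint, and components are then read off by grouping the nodes (in first-appearance order) by their final label; no adjacency structure and no traversal stack exist in B.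
import Mathlib
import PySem

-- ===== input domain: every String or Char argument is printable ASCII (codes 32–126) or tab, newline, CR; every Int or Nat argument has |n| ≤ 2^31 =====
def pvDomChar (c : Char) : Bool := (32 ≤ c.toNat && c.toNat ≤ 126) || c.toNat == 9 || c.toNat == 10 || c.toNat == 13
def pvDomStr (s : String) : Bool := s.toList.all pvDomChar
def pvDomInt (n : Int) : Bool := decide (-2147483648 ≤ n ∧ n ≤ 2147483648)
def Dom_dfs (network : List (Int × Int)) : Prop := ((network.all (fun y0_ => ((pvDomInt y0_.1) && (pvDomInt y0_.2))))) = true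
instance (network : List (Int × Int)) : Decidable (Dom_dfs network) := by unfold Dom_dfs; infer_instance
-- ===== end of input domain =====

-- B replaces A's DFS (adjacency dict + explicit stack) by min-label propagation
-- to a fixpoint followed by grouping the nodes by their final label; objective:
-- alternative (a genuinely different algorithm of comparable cost).
-- NOTE: both Pythons return a list of SETS; a Python set's iteration order is not
-- modelled (see PySem.Set), so each returned set is represented canonically in
-- ascending order by both ports — exact as set values, which is how set outputs
-- are compared.

-- ===== PORT A =====
-- adjacency-building loop of Source A:
-- 'adj.setdefault(a, set()).add(b); adj.setdefault(b, set()).add(a)'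
def dfsAdj (network : List (Int × Int)) : PySem.Dict Int (PySem.Set Int) :=
  network.foldl
    (fun adj p =>
      (adj.modify p.1 PySem.Set.empty (fun s => PySem.Set.add s p.2)).modify p.2
        PySem.Set.empty (fun s => PySem.Set.add s p.1))
    PySem.Dict.empty

-- the 'while stack:' loop of Source A; fuel-counted (2*len(network)+1 always suffices:
-- pops ≤ 1 + total pushes ≤ 1 + sum of adjacency-set sizes).  'adj[node]' can never
-- raise KeyError (every stack element is a dict key), so getD is exact here.
def dfsLoop (adj : PySem.Dict Int (PySem.Set Int)) :
    Nat → PySem.Set Int → PySem.Set Int → List Int → PySem.Set Int × PySem.Set Int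
  | 0, visited, cc, _ => (visited, cc)
  | fuel + 1, visited, cc, stack =>
    match PySem.List.pop? stack (-1) with
    | none => (visited, cc)                                   -- 'while stack:' ends
    | some (node, rest) =>
      if PySem.Set.contains visited node then
        dfsLoop adj fuel visited cc rest
      else
        dfsLoop adj fuel (PySem.Set.add visited node) (PySem.Set.add cc node)
          (rest ++ adj.getD node PySem.Set.empty)             -- stack.extend(adj[node])

-- body of 'for node in adj: if node not in visited: …'
def dfsStart (adj : PySem.Dict Int (PySem.Set Int)) (fuel : Nat)
    (st : PySem.Set Int × List (PySem.Set Int)) (node : Int) :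
    PySem.Set Int × List (PySem.Set Int) :=
  if PySem.Set.contains st.1 node then st
  else
    let r := dfsLoop adj fuel st.1 PySem.Set.empty [node]
    (r.1, st.2 ++ [r.2])

def dfs (network : List (Int × Int)) : List (List Int) :=
  let adj := dfsAdj network
  let fuel := 2 * network.length + 1
  let res := (PySem.Dict.keys adj).foldl (dfsStart adj fuel) (PySem.Set.empty, [])
  let aNodes := PySem.Set.ofList (network.map (fun p => p.1))
  res.2.map (fun cc =>
    PySem.List.sorted (PySem.Set.ofList (cc.filter (fun n => PySem.Set.contains aNodes n)))
      (fun x => x))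

-- ===== PORT B =====
-- 'for a, b in network: for v in (a, b): if v not in seen: …' of Source B
def altNodes (network : List (Int × Int)) : PySem.Set Int × List Int :=
  network.foldl
    (fun st p =>
      let st1 := if PySem.Set.contains st.1 p.1 then st
                 else (PySem.Set.add st.1 p.1, st.2 ++ [p.1])
      if PySem.Set.contains st1.1 p.2 then st1
      else (PySem.Set.add st1.1 p.2, st1.2 ++ [p.2]))
    (PySem.Set.empty, [])

-- one sweep 'for a, b in network + network[::-1]: …' of Source B; labels[a]/labels[b]
-- never raise (every edge endpoint is a key), so getD is exact here.
def altPass (network : List (Int × Int)) (st : PySem.Dict Int Int × Bool) :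
    PySem.Dict Int Int × Bool :=
  (network ++ network.reverse).foldl
    (fun st p =>
      let la := st.1.getD p.1 0
      let lb := st.1.getD p.2 0
      if la ≠ lb then
        ((st.1.insert p.1 (min la lb)).insert p.2 (min la lb), true)
      else st)
    st

-- 'while changed:' of Source B; fuel-counted ((2*len(network)+1)^2 always suffices:
-- each sweep that reports a change strictly lowers some label, labels only move
-- down a chain of at most |nodes| values each, and |nodes| ≤ 2*len(network)).
def altLoop (network : List (Int × Int)) :
    Nat → PySem.Dict Int Int → PySem.Dict Int Int
  | 0, labels => labels
  | fuel + 1, labels =>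
    let r := altPass network (labels, false)
    if r.2 then altLoop network fuel r.1 else r.1

def dfs_alt (network : List (Int × Int)) : List (List Int) :=
  let nodes := (altNodes network).2
  let labels0 := nodes.foldl (fun d v => d.insert v v) PySem.Dict.empty
  let fuel := (2 * network.length + 1) * (2 * network.length + 1)
  let labels := altLoop network fuel labels0
  let byroot := nodes.foldl
    (fun d v => d.modify (labels.getD v 0) [] (fun c => c ++ [v])) PySem.Dict.empty
  let aNodes := PySem.Set.ofList (network.map (fun p => p.1))
  byroot.values.map (fun c =>
    PySem.List.sorted (PySem.Set.ofList (c.filter (fun n => PySem.Set.contains aNodes n)))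
      (fun x => x))

-- ===== PRECONDITION & SPEC =====
def Spec_dfs (network : List (Int × Int)) (out : List (List Int)) : Prop := out = dfs_alt network
instance (network : List (Int × Int)) (out : List (List Int)) : Decidable (Spec_dfs network out) := by unfold Spec_dfs; infer_instance

-- ===== CLAIM (what is proved, stated in full; the proofs are below) =====
def Claim_equal_dfs : Prop := ∀ (network : List (Int × Int)), Dom_dfs network → Spec_dfs network (dfs network)

-- ===== LEMMAS AND PROOFS =====

-- ---- graph connectivity (proof-only notions) ----

def EdgeOf (network : List (Int × Int)) (x y : Int) : Prop :=
  (x, y) ∈ network ∨ (y, x) ∈ network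

inductive Conn (network : List (Int × Int)) (x : Int) : Int → Prop
  | refl : Conn network x x
  | tail {y z : Int} : Conn network x y → EdgeOf network y z → Conn network x z

theorem edgeOf_symm {network : List (Int × Int)} {x y : Int}
    (h : EdgeOf network x y) : EdgeOf network y x := h.symm

theorem conn_trans {network : List (Int × Int)} {a b c : Int}
    (h1 : Conn network a b) (h2 : Conn network b c) : Conn network a c := by
  induction h2 with
  | refl => exact h1
  | tail _ he ih => exact Conn.tail ih he

theorem conn_symm {network : List (Int × Int)} {a b : Int}
    (h : Conn network a b) : Conn network b a := by
  induction h with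
  | refl => exact Conn.refl
  | tail _ he ih => exact conn_trans (Conn.tail Conn.refl (edgeOf_symm he)) ih

-- a closed (saturated) visited set
def ClosedSet (network : List (Int × Int)) (v : List Int) : Prop :=
  ∀ x ∈ v, ∀ y, EdgeOf network x y → y ∈ v

theorem mem_of_conn_of_closed {network : List (Int × Int)} {v : List Int} {s y : Int}
    (hc : ClosedSet network v) (h : Conn network s y) (hy : y ∈ v) : s ∈ v := by
  induction h with
  | refl => exact hy
  | tail _ he ih => exact ih (hc _ hy _ (edgeOf_symm he))

-- the flattened edge list and the node list
def flatNodes (network : List (Int × Int)) : List Int :=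
  network.flatMap (fun p => [p.1, p.2])

theorem mem_flatNodes_left {network : List (Int × Int)} {p : Int × Int}
    (h : p ∈ network) : p.1 ∈ flatNodes network := by
  simp only [flatNodes, List.mem_flatMap]; exact ⟨p, h, by simp⟩

theorem mem_flatNodes_right {network : List (Int × Int)} {p : Int × Int}
    (h : p ∈ network) : p.2 ∈ flatNodes network := by
  simp only [flatNodes, List.mem_flatMap]; exact ⟨p, h, by simp⟩

theorem mem_flatNodes_of_edgeOf {network : List (Int × Int)} {x y : Int}
    (h : EdgeOf network x y) : x ∈ flatNodes network ∧ y ∈ flatNodes network := by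
  rcases h with h | h
  · exact ⟨mem_flatNodes_left (p := (x, y)) h, mem_flatNodes_right (p := (x, y)) h⟩
  · exact ⟨mem_flatNodes_right (p := (y, x)) h, mem_flatNodes_left (p := (y, x)) h⟩

theorem mem_flatNodes_of_conn {network : List (Int × Int)} {x y : Int}
    (h : Conn network x y) : x = y ∨ y ∈ flatNodes network := by
  induction h with
  | refl => exact Or.inl rfl
  | tail _ he _ => exact Or.inr (mem_flatNodes_of_edgeOf he).2

theorem length_flatNodes (network : List (Int × Int)) :
    (flatNodes network).length = 2 * network.length := by
  induction network with
  | nil => rfl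
  | cons p net ih => simp [flatNodes, List.flatMap_cons] at ih ⊢; omega

-- ---- the adjacency dict of port A ----

theorem pv_keys_modify (d : PySem.Dict Int (PySem.Set Int)) (k : Int) (d0 : PySem.Set Int)
    (f : PySem.Set Int → PySem.Set Int) :
    (d.modify k d0 f).keys = PySem.Set.add d.keys k := by
  rw [PySem.Dict.keys_modify]
  by_cases h : d.contains k = true
  · rw [PySem.Dict.keys_insert_of_contains _ _ h]
    have : k ∈ d.keys := (PySem.Dict.contains_iff_mem_keys _ _).1 h
    simp [PySem.Set.add, this]
  · rw [PySem.Dict.keys_insert_of_not_contains _ _ (by simpa using h)]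
    have : k ∉ d.keys := fun hm => h ((PySem.Dict.contains_iff_mem_keys _ _).2 hm)
    simp [PySem.Set.add, this]

theorem pv_keys_fold (network : List (Int × Int)) :
    ∀ d : PySem.Dict Int (PySem.Set Int),
    (network.foldl
      (fun adj p =>
        (adj.modify p.1 PySem.Set.empty (fun s => PySem.Set.add s p.2)).modify p.2
          PySem.Set.empty (fun s => PySem.Set.add s p.1)) d).keys
      = (flatNodes network).foldl PySem.Set.add d.keys := by
  induction network with
  | nil => intro d; rfl
  | cons p net ih =>
    intro d
    rw [List.foldl_cons, ih]
    simp only [flatNodes, List.flatMap_cons, List.cons_append, List.nil_append,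
      List.foldl_cons, pv_keys_modify]

theorem pv_keys (network : List (Int × Int)) :
    (dfsAdj network).keys = PySem.Set.ofList (flatNodes network) := by
  rw [dfsAdj, pv_keys_fold, PySem.Set.ofList_eq_foldl]
  rfl

-- membership in the adjacency sets is edge incidence
theorem mem_adj_fold (network : List (Int × Int)) :
    ∀ (d : PySem.Dict Int (PySem.Set Int)) (x y : Int),
    (y ∈ (network.foldl
      (fun adj p =>
        (adj.modify p.1 PySem.Set.empty (fun s => PySem.Set.add s p.2)).modify p.2
          PySem.Set.empty (fun s => PySem.Set.add s p.1)) d).getD x PySem.Set.empty)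
      ↔ y ∈ d.getD x PySem.Set.empty ∨ EdgeOf network x y := by
  induction network with
  | nil =>
    intro d x y
    simp [EdgeOf]
  | cons p net ih =>
    intro d x y
    rw [List.foldl_cons, ih]
    have hstep : ∀ z : Int, y ∈
        ((d.modify p.1 PySem.Set.empty (fun s => PySem.Set.add s p.2)).modify p.2
          PySem.Set.empty (fun s => PySem.Set.add s p.1)).getD z PySem.Set.empty
        ↔ y ∈ d.getD z PySem.Set.empty ∨ (z = p.1 ∧ y = p.2) ∨ (z = p.2 ∧ y = p.1) := by
      intro z
      simp only [PySem.Dict.getD_modify]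
      split_ifs <;> simp_all [PySem.Set.mem_add]
    rw [hstep x]
    have hedge : EdgeOf (p :: net) x y
        ↔ ((x = p.1 ∧ y = p.2) ∨ (x = p.2 ∧ y = p.1)) ∨ EdgeOf net x y := by
      simp only [EdgeOf, List.mem_cons, Prod.ext_iff]
      tauto
    rw [hedge]
    tauto

theorem mem_adj (network : List (Int × Int)) (x y : Int) :
    y ∈ (dfsAdj network).getD x PySem.Set.empty ↔ EdgeOf network x y := by
  rw [dfsAdj, mem_adj_fold]
  simp [PySem.Dict.getD_empty, PySem.Set.empty]

-- ---- small arithmetic helpers ----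

theorem sum_filter_le (l : List Int) (q : Int → Bool) (f : Int → Nat) :
    ((l.filter q).map f).sum ≤ (l.map f).sum := by
  induction l with
  | nil => simp
  | cons k l ih =>
    by_cases hk : q k = true <;> simp [List.filter_cons, hk] <;> omega

theorem sum_filter_drop_le (l : List Int) (p : Int → Bool) (node : Int) (f : Int → Nat)
    (hp : p node = true) :
    ((l.filter (fun k => p k && !(k == node))).map f).sum
      + (if node ∈ l then f node else 0) ≤ ((l.filter p).map f).sum := by
  induction l with
  | nil => simp
  | cons k l ih =>
    rw [List.filter_cons, List.filter_cons]
    by_cases hk : k = node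
    · subst hk
      simp only [beq_self_eq_true, Bool.not_true, Bool.and_false, Bool.false_eq_true,
        if_false, hp, if_true, List.mem_cons, true_or, ite_true, List.map_cons,
        List.sum_cons]
      by_cases hm : k ∈ l <;> simp only [hm, if_true, if_false, ite_true, ite_false] at ih <;> omega
    · have h1 : (p k && !(k == node)) = p k := by simp [hk]
      rw [h1]
      have hmm : (if node ∈ k :: l then f node else 0) = (if node ∈ l then f node else 0) := by
        by_cases hm : node ∈ l
        · rw [if_pos hm, if_pos (List.mem_cons_of_mem _ hm)]
        · rw [if_neg hm, if_neg (by simp only [List.mem_cons]; rintro (h | h); exact hk h.symm; exact hm h)]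
      rw [hmm]
      by_cases hm : node ∈ l <;> by_cases hpk : p k = true <;>
        simp only [hm, hpk, Bool.false_eq_true, if_true, if_false, ite_true, ite_false,
          List.map_cons, List.sum_cons] at ih ⊢ <;> omega

-- ---- the DFS stack-size measure ----

def adjMeasure (adj : PySem.Dict Int (PySem.Set Int)) (v : PySem.Set Int) : Nat :=
  ((adj.keys.filter (fun k => !(PySem.Set.contains v k))).map
    (fun k => (adj.getD k PySem.Set.empty).length)).sum

theorem adjMeasure_le_empty (adj : PySem.Dict Int (PySem.Set Int)) (v : PySem.Set Int) :
    adjMeasure adj v ≤ (adj.keys.map (fun k => (adj.getD k PySem.Set.empty).length)).sum :=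
  sum_filter_le _ _ _

theorem adjMeasure_add (adj : PySem.Dict Int (PySem.Set Int)) (v : PySem.Set Int)
    (node : Int) (hnv : node ∉ v) :
    adjMeasure adj (PySem.Set.add v node) + (adj.getD node PySem.Set.empty).length
      ≤ adjMeasure adj v := by
  unfold adjMeasure
  have hpred : ∀ k, (!(PySem.Set.contains (PySem.Set.add v node) k))
      = ((!(PySem.Set.contains v k)) && !(k == node)) := by
    intro k
    by_cases hkv : k ∈ v <;> by_cases hkn : k = node <;>
      simp [PySem.Set.mem_add, hkv, hkn, PySem.Set.contains_iff] <;> tauto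
  rw [List.filter_congr (fun k _ => hpred k)]
  have hmain := sum_filter_drop_le adj.keys (fun k => !(PySem.Set.contains v k)) node
    (fun k => (adj.getD k PySem.Set.empty).length)
    (by simp [PySem.Set.contains_iff, hnv])
  by_cases hk : node ∈ adj.keys
  · rw [if_pos hk] at hmain
    exact hmain
  · rw [if_neg hk] at hmain
    have h0 : adj.getD node PySem.Set.empty = PySem.Set.empty :=
      PySem.Dict.getD_of_not_contains _ _
        (by
          by_contra hc
          exact hk ((PySem.Dict.contains_iff_mem_keys _ _).1 (by simpa using hc)))
    rw [h0]
    simpa using hmain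

-- Σ map g ≤ Σ map f + 1 when g bumps f at a single position of a Nodup list
theorem sum_map_single_bump (l : List Int) (hnd : l.Nodup) (f g : Int → Nat) (x : Int)
    (h1 : ∀ k ∈ l, k ≠ x → g k = f k) (h2 : g x ≤ f x + 1) :
    (l.map g).sum ≤ (l.map f).sum + 1 := by
  induction l with
  | nil => simp
  | cons k l ih =>
    rcases List.nodup_cons.1 hnd with ⟨hkl, hndl⟩
    by_cases hk : k = x
    · subst hk
      have heq : l.map g = l.map f := by
        refine List.map_congr_left (fun m hm => h1 m (List.mem_cons_of_mem _ hm) ?_)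
        intro hmx; exact hkl (hmx ▸ hm)
      simp only [List.map_cons, List.sum_cons, heq]
      omega
    · have hg : g k = f k := h1 k (List.mem_cons_self ..) hk
      have := ih hndl (fun m hm hmx => h1 m (List.mem_cons_of_mem _ hm) hmx)
      simp only [List.map_cons, List.sum_cons, hg]
      omega

theorem adj_total_modify (d : PySem.Dict Int (PySem.Set Int)) (x y : Int)
    (hnd : d.keys.Nodup) :
    (((d.modify x PySem.Set.empty (fun s => PySem.Set.add s y)).keys.map
      (fun k => ((d.modify x PySem.Set.empty (fun s => PySem.Set.add s y)).getD k
        PySem.Set.empty).length)).sum)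
      ≤ (d.keys.map (fun k => (d.getD k PySem.Set.empty).length)).sum + 1 := by
  have hkeys := pv_keys_modify d x PySem.Set.empty (fun s => PySem.Set.add s y)
  have hget : ∀ k, (d.modify x PySem.Set.empty (fun s => PySem.Set.add s y)).getD k
      PySem.Set.empty
      = if k = x then PySem.Set.add (d.getD x PySem.Set.empty) y
        else d.getD k PySem.Set.empty := by
    intro k; rw [PySem.Dict.getD_modify]
  have hlen : ∀ s : PySem.Set Int, (PySem.Set.add s y).length ≤ s.length + 1 := by
    intro s
    rw [PySem.Set.add_eq_ite]
    split_ifs <;> simp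
  by_cases hx : x ∈ d.keys
  · rw [hkeys, PySem.Set.add_of_mem hx]
    refine sum_map_single_bump d.keys hnd _ _ x (fun k _ hkx => by rw [hget, if_neg hkx]) ?_
    rw [hget, if_pos rfl]
    exact hlen _
  · rw [hkeys, PySem.Set.add_of_not_mem hx]
    have hmap : (d.keys.map (fun k => ((d.modify x PySem.Set.empty
        (fun s => PySem.Set.add s y)).getD k PySem.Set.empty).length))
        = d.keys.map (fun k => (d.getD k PySem.Set.empty).length) := by
      refine List.map_congr_left (fun k hk => ?_)
      rw [hget, if_neg (fun h : k = x => hx (h ▸ hk))]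
    have hx0 : d.getD x PySem.Set.empty = PySem.Set.empty :=
      PySem.Dict.getD_of_not_contains _ _
        (by
          by_contra hc
          exact hx ((PySem.Dict.contains_iff_mem_keys _ _).1 (by simpa using hc)))
    rw [List.map_append, List.sum_append, hmap, List.map_singleton, List.sum_singleton,
      hget, if_pos rfl, hx0]
    simp [PySem.Set.add, PySem.Set.empty]

theorem adj_total_fold (network : List (Int × Int)) :
    ∀ d : PySem.Dict Int (PySem.Set Int), d.keys.Nodup →
    ((network.foldl
      (fun adj p =>
        (adj.modify p.1 PySem.Set.empty (fun s => PySem.Set.add s p.2)).modify p.2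
          PySem.Set.empty (fun s => PySem.Set.add s p.1)) d).keys.Nodup)
    ∧ (((network.foldl
      (fun adj p =>
        (adj.modify p.1 PySem.Set.empty (fun s => PySem.Set.add s p.2)).modify p.2
          PySem.Set.empty (fun s => PySem.Set.add s p.1)) d).keys.map
        (fun k => ((network.foldl
          (fun adj p =>
            (adj.modify p.1 PySem.Set.empty (fun s => PySem.Set.add s p.2)).modify p.2
              PySem.Set.empty (fun s => PySem.Set.add s p.1)) d).getD k
          PySem.Set.empty).length)).sum)
      ≤ (d.keys.map (fun k => (d.getD k PySem.Set.empty).length)).sum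
        + 2 * network.length := by
  induction network with
  | nil => intro d hnd; exact ⟨hnd, by simp⟩
  | cons p net ih =>
    intro d hnd
    rw [List.foldl_cons]
    have hnd1 : (d.modify p.1 PySem.Set.empty (fun s => PySem.Set.add s p.2)).keys.Nodup := by
      rw [pv_keys_modify]; exact PySem.Set.nodup_add _ _ hnd
    have hnd2 : ((d.modify p.1 PySem.Set.empty (fun s => PySem.Set.add s p.2)).modify p.2
        PySem.Set.empty (fun s => PySem.Set.add s p.1)).keys.Nodup := by
      rw [pv_keys_modify]; exact PySem.Set.nodup_add _ _ hnd1
    obtain ⟨h1, h2⟩ := ih _ hnd2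
    refine ⟨h1, ?_⟩
    have hb := adj_total_modify (d.modify p.1 PySem.Set.empty (fun s => PySem.Set.add s p.2))
      p.2 p.1 hnd1
    have ha := adj_total_modify d p.1 p.2 hnd
    simp only [List.length_cons]
    omega

theorem adj_total_le (network : List (Int × Int)) :
    ((dfsAdj network).keys.map
      (fun k => ((dfsAdj network).getD k PySem.Set.empty).length)).sum
      ≤ 2 * network.length := by
  have := (adj_total_fold network PySem.Dict.empty (by simp [PySem.Dict.keys_empty])).2
  simpa [dfsAdj, PySem.Dict.keys_empty] using this

-- ---- the DFS inner-loop master lemma ----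

theorem dfsLoop_master (network : List (Int × Int)) :
    ∀ (fuel : Nat) (v cc : PySem.Set Int) (st : List Int),
    st.length + adjMeasure (dfsAdj network) v ≤ fuel → v.Nodup → cc.Nodup →
    (∀ y ∈ v, y ∈ (dfsLoop (dfsAdj network) fuel v cc st).1)
    ∧ (∀ y, y ∈ (dfsLoop (dfsAdj network) fuel v cc st).2 ↔
        y ∈ cc ∨ (y ∈ (dfsLoop (dfsAdj network) fuel v cc st).1 ∧ y ∉ v))
    ∧ (∀ y ∈ st, y ∈ (dfsLoop (dfsAdj network) fuel v cc st).1)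
    ∧ (∀ x, x ∈ (dfsLoop (dfsAdj network) fuel v cc st).1 → x ∉ v →
        ∀ y, EdgeOf network x y → y ∈ (dfsLoop (dfsAdj network) fuel v cc st).1)
    ∧ (∀ x ∈ (dfsLoop (dfsAdj network) fuel v cc st).1,
        x ∈ v ∨ ∃ s ∈ st, Conn network s x)
    ∧ (dfsLoop (dfsAdj network) fuel v cc st).1.Nodup
    ∧ (dfsLoop (dfsAdj network) fuel v cc st).2.Nodup := by
  intro fuel
  induction fuel with
  | zero =>
    intro v cc st hfuel hv hcc
    have hst : st = [] := List.eq_nil_of_length_eq_zero (by omega)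
    subst hst
    have hr : dfsLoop (dfsAdj network) 0 v cc [] = (v, cc) := rfl
    rw [hr]
    refine ⟨fun y hy => hy, ?_, by simp, fun x hx hxv => absurd hx hxv,
      fun x hx => Or.inl hx, hv, hcc⟩
    intro y
    constructor
    · exact fun h => Or.inl h
    · rintro (h | ⟨h1, h2⟩)
      · exact h
      · exact absurd h1 h2
  | succ fuel ih =>
    intro v cc st hfuel hv hcc
    rcases List.eq_nil_or_concat st with rfl | ⟨ys, y, rfl⟩
    · have hr : dfsLoop (dfsAdj network) (fuel + 1) v cc [] = (v, cc) := by
        rw [dfsLoop]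
        simp [PySem.List.pop?]
      rw [hr]
      refine ⟨fun y hy => hy, ?_, by simp, fun x hx hxv => absurd hx hxv,
        fun x hx => Or.inl hx, hv, hcc⟩
      intro y
      constructor
      · exact fun h => Or.inl h
      · rintro (h | ⟨h1, h2⟩)
        · exact h
        · exact absurd h1 h2
    · have hpop : PySem.List.pop? (ys ++ [y]) (-1) = some (y, ys) := PySem.List.pop?_last ys y
      simp only [List.concat_eq_append] at hfuel ⊢
      rw [dfsLoop, hpop]
      dsimp only
      by_cases hvy : PySem.Set.contains v y = true
      · rw [if_pos hvy]
        have hy : y ∈ v := (PySem.Set.contains_iff _ _).1 hvy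
        have hfe : ys.length + adjMeasure (dfsAdj network) v ≤ fuel := by
          have h1 : (ys ++ [y]).length = ys.length + 1 := by simp
          omega
        obtain ⟨a, b, c, d, e, f1, f2⟩ := ih v cc ys hfe hv hcc
        refine ⟨a, b, ?_, d, ?_, f1, f2⟩
        · intro y' hy'
          rcases List.mem_append.1 hy' with h | h
          · exact c _ h
          · rw [List.mem_singleton.1 h]
            exact a _ hy
        · intro x hx
          rcases e x hx with h | ⟨s, hs, hcs⟩
          · exact Or.inl h
          · exact Or.inr ⟨s, List.mem_append.2 (Or.inl hs), hcs⟩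
      · rw [if_neg hvy]
        have hy : y ∉ v := fun h => hvy ((PySem.Set.contains_iff _ _).2 h)
        have hfe : (ys ++ (dfsAdj network).getD y PySem.Set.empty).length
            + adjMeasure (dfsAdj network) (PySem.Set.add v y) ≤ fuel := by
          have hS := adjMeasure_add (dfsAdj network) v y hy
          have h1 : (ys ++ [y]).length = ys.length + 1 := by simp
          have h2 : (ys ++ (dfsAdj network).getD y PySem.Set.empty).length
              = ys.length + ((dfsAdj network).getD y PySem.Set.empty).length := by simp
          omega
        obtain ⟨a, b, c, d, e, f1, f2⟩ := ih (PySem.Set.add v y) (PySem.Set.add cc y)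
          (ys ++ (dfsAdj network).getD y PySem.Set.empty) hfe
          (PySem.Set.nodup_add _ _ hv) (PySem.Set.nodup_add _ _ hcc)
        have hyr : y ∈ (dfsLoop (dfsAdj network) fuel (PySem.Set.add v y)
            (PySem.Set.add cc y) (ys ++ (dfsAdj network).getD y PySem.Set.empty)).1 :=
          a _ ((PySem.Set.mem_add _ _ _).2 (Or.inr rfl))
        refine ⟨?_, ?_, ?_, ?_, ?_, f1, f2⟩
        · intro y' hy'
          exact a _ ((PySem.Set.mem_add _ _ _).2 (Or.inl hy'))
        · intro y'
          rw [b y']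
          constructor
          · rintro (h | ⟨h1, h2⟩)
            · rcases (PySem.Set.mem_add _ _ _).1 h with h | h
              · exact Or.inl h
              · exact Or.inr ⟨h ▸ hyr, h ▸ hy⟩
            · exact Or.inr ⟨h1, fun hc => h2 ((PySem.Set.mem_add _ _ _).2 (Or.inl hc))⟩
          · rintro (h | ⟨h1, h2⟩)
            · exact Or.inl ((PySem.Set.mem_add _ _ _).2 (Or.inl h))
            · by_cases hyy : y' = y
              · exact Or.inl ((PySem.Set.mem_add _ _ _).2 (Or.inr hyy))
              · refine Or.inr ⟨h1, fun hc => ?_⟩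
                rcases (PySem.Set.mem_add _ _ _).1 hc with hc | hc
                · exact h2 hc
                · exact hyy hc
        · intro y' hy'
          rcases List.mem_append.1 hy' with h | h
          · exact c _ (List.mem_append.2 (Or.inl h))
          · rw [List.mem_singleton.1 h]
            exact hyr
        · intro x hx hxv w hw
          by_cases hxy : x = y
          · subst hxy
            have hwnb : w ∈ (dfsAdj network).getD x PySem.Set.empty := (mem_adj network x w).2 hw
            exact c _ (List.mem_append.2 (Or.inr hwnb))
          · refine d x hx (fun hc => ?_) w hw
            rcases (PySem.Set.mem_add _ _ _).1 hc with hc | hc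
            · exact hxv hc
            · exact hxy hc
        · intro x hx
          rcases e x hx with h | ⟨s, hs, hcs⟩
          · rcases (PySem.Set.mem_add _ _ _).1 h with h | h
            · exact Or.inl h
            · exact Or.inr ⟨y, List.mem_append.2 (Or.inr (List.mem_singleton.2 rfl)),
                by rw [h]; exact Conn.refl⟩
          · rcases List.mem_append.1 hs with hsy | hsn
            · exact Or.inr ⟨s, List.mem_append.2 (Or.inl hsy), hcs⟩
            · have hedge : EdgeOf network y s := (mem_adj network y s).1 hsn
              exact Or.inr ⟨y, List.mem_append.2 (Or.inr (List.mem_singleton.2 rfl)),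
                conn_trans (Conn.tail Conn.refl hedge) hcs⟩

-- per-start corollary: one DFS from an unvisited start computes its component
theorem dfs_component (network : List (Int × Int)) (v : PySem.Set Int) (x : Int)
    (hcl : ClosedSet network v) (hnd : v.Nodup) (hx : x ∉ v) :
    (∀ y, y ∈ (dfsLoop (dfsAdj network) (2 * network.length + 1) v PySem.Set.empty [x]).1
        ↔ y ∈ v ∨ Conn network x y)
    ∧ (∀ y, y ∈ (dfsLoop (dfsAdj network) (2 * network.length + 1) v PySem.Set.empty [x]).2
        ↔ Conn network x y)
    ∧ (dfsLoop (dfsAdj network) (2 * network.length + 1) v PySem.Set.empty [x]).1.Nodup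
    ∧ (dfsLoop (dfsAdj network) (2 * network.length + 1) v PySem.Set.empty [x]).2.Nodup := by
  have htot := adj_total_le network
  have hSle := adjMeasure_le_empty (dfsAdj network) v
  have hfuel : ([x] : List Int).length + adjMeasure (dfsAdj network) v
      ≤ 2 * network.length + 1 := by
    simp only [List.length_singleton]
    omega
  obtain ⟨a, b, c, d, e, f1, f2⟩ := dfsLoop_master network (2 * network.length + 1) v
    PySem.Set.empty [x] hfuel hnd List.nodup_nil
  have hconnV : ∀ y, Conn network x y →
      y ∈ (dfsLoop (dfsAdj network) (2 * network.length + 1) v PySem.Set.empty [x]).1 := by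
    intro y hc
    induction hc with
    | refl => exact c x (List.mem_singleton.2 rfl)
    | tail h he ihc =>
      rename_i yy zz
      by_cases hyv : yy ∈ v
      · exact a _ (hcl _ hyv _ he)
      · exact d _ ihc hyv _ he
  have hV : ∀ y, y ∈ (dfsLoop (dfsAdj network) (2 * network.length + 1) v
      PySem.Set.empty [x]).1 ↔ y ∈ v ∨ Conn network x y := by
    intro y
    constructor
    · intro h
      rcases e y h with h1 | ⟨s, hs, hcs⟩
      · exact Or.inl h1
      · rw [List.mem_singleton.1 hs] at hcs
        exact Or.inr hcs
    · rintro (h | h)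
      · exact a _ h
      · exact hconnV y h
  refine ⟨hV, ?_, f1, f2⟩
  intro y
  rw [b y]
  constructor
  · rintro (h | ⟨h1, h2⟩)
    · simp [PySem.Set.empty] at h
    · rcases (hV y).1 h1 with h3 | h3
      · exact absurd h3 h2
      · exact h3
  · intro hc
    exact Or.inr ⟨hconnV y hc, fun hyv => hx (mem_of_conn_of_closed hcl hc hyv)⟩

-- ---- port B: the node list ----

theorem altNodes_fold (network : List (Int × Int)) :
    ∀ s : PySem.Set Int,
    network.foldl
      (fun (st : PySem.Set Int × List Int) p =>
        let st1 := if PySem.Set.contains st.1 p.1 then st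
                   else (PySem.Set.add st.1 p.1, st.2 ++ [p.1])
        if PySem.Set.contains st1.1 p.2 then st1
        else (PySem.Set.add st1.1 p.2, st1.2 ++ [p.2])) (s, s)
      = ((flatNodes network).foldl PySem.Set.add s,
         (flatNodes network).foldl PySem.Set.add s) := by
  induction network with
  | nil => intro s; simp [flatNodes]
  | cons p net ih =>
    intro s
    rw [List.foldl_cons]
    try dsimp only
    by_cases h1 : PySem.Set.contains s p.1 = true
    · have e1 : PySem.Set.add s p.1 = s :=
        PySem.Set.add_of_mem ((PySem.Set.contains_iff _ _).1 h1)
      rw [if_pos h1]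
      try dsimp only
      by_cases h2 : PySem.Set.contains s p.2 = true
      · have e2 : PySem.Set.add s p.2 = s :=
          PySem.Set.add_of_mem ((PySem.Set.contains_iff _ _).1 h2)
        rw [if_pos h2, ih s]
        simp [flatNodes, List.flatMap_cons, e1, e2]
      · have e2 : PySem.Set.add s p.2 = s ++ [p.2] :=
          PySem.Set.add_of_not_mem (fun h => h2 ((PySem.Set.contains_iff _ _).2 h))
        rw [if_neg h2]
        try dsimp only
        rw [← e2, ih (PySem.Set.add s p.2)]
        simp [flatNodes, List.flatMap_cons, e1]
    · have e1 : PySem.Set.add s p.1 = s ++ [p.1] :=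
        PySem.Set.add_of_not_mem (fun h => h1 ((PySem.Set.contains_iff _ _).2 h))
      rw [if_neg h1]
      try dsimp only
      by_cases h2 : PySem.Set.contains (PySem.Set.add s p.1) p.2 = true
      · have e2 : PySem.Set.add (PySem.Set.add s p.1) p.2 = PySem.Set.add s p.1 :=
          PySem.Set.add_of_mem ((PySem.Set.contains_iff _ _).1 h2)
        rw [if_pos h2]
        try dsimp only
        rw [← e1, ih (PySem.Set.add s p.1)]
        simp [flatNodes, List.flatMap_cons, e2]
      · have e2 : PySem.Set.add (PySem.Set.add s p.1) p.2
            = PySem.Set.add s p.1 ++ [p.2] :=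
          PySem.Set.add_of_not_mem (fun h => h2 ((PySem.Set.contains_iff _ _).2 h))
        rw [if_neg h2]
        try dsimp only
        rw [← e1, ← e2, ih (PySem.Set.add (PySem.Set.add s p.1) p.2)]
        simp [flatNodes, List.flatMap_cons]

theorem altNodes_eq (network : List (Int × Int)) :
    altNodes network = (PySem.Set.ofList (flatNodes network),
      PySem.Set.ofList (flatNodes network)) := by
  have h := altNodes_fold network []
  unfold altNodes
  rw [PySem.Set.ofList_eq_foldl]
  exact h

-- ---- port B: labels ----

def labInv (network : List (Int × Int)) (L : List Int) (d : PySem.Dict Int Int) : Prop :=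
  ∀ k ∈ L, d.getD k 0 ∈ L ∧ Conn network k (d.getD k 0)

def labMeasure (L : List Int) (d : PySem.Dict Int Int) : Nat :=
  (L.map (fun k => L.countP (fun u => decide (u < d.getD k 0)))).sum

def Stable (network : List (Int × Int)) (d : PySem.Dict Int Int) : Prop :=
  ∀ p ∈ network, d.getD p.1 0 = d.getD p.2 0

-- proof-side name for the body of Source B's sweep
def passStep (st : PySem.Dict Int Int × Bool) (p : Int × Int) : PySem.Dict Int Int × Bool :=
  let la := st.1.getD p.1 0
  let lb := st.1.getD p.2 0
  if la ≠ lb then ((st.1.insert p.1 (min la lb)).insert p.2 (min la lb), true) else st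

theorem altPass_eq (network : List (Int × Int)) (st : PySem.Dict Int Int × Bool) :
    altPass network st = (network ++ network.reverse).foldl passStep st := rfl

theorem countP_lt_of_lt (l : List Int) (m c : Int) (hmc : m < c) (hm : m ∈ l) :
    l.countP (fun u => decide (u < m)) < l.countP (fun u => decide (u < c)) := by
  induction l with
  | nil => simp at hm
  | cons k l ih =>
    rw [List.countP_cons, List.countP_cons]
    have hmono : l.countP (fun u => decide (u < m)) ≤ l.countP (fun u => decide (u < c)) :=
      List.countP_mono_left (fun x _ hx => by
        simp only [decide_eq_true_eq] at hx ⊢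
        omega)
    rcases List.mem_cons.1 hm with hk | hk
    · have e1 : (fun u => decide (u < m)) k = false := by rw [← hk]; simp
      have e2 : (fun u => decide (u < c)) k = true := by rw [← hk]; simp [hmc]
      simp only [e1, e2, Bool.false_eq_true, if_false, if_true, ite_true, ite_false]
      omega
    · have hstrict := ih hk
      by_cases h1 : k < m
      · have e1 : (fun u => decide (u < m)) k = true := by simp [h1]
        have e2 : (fun u => decide (u < c)) k = true := by
          simp only [decide_eq_true_eq]
          omega
        simp only [e1, e2, if_true, ite_true]
        omega
      · have e1 : (fun u => decide (u < m)) k = false := by simp [h1]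
        by_cases h2 : k < c
        · have e2 : (fun u => decide (u < c)) k = true := by simp [h2]
          simp only [e1, e2, Bool.false_eq_true, if_false, if_true, ite_true, ite_false]
          omega
        · have e2 : (fun u => decide (u < c)) k = false := by simp [h2]
          simp only [e1, e2, Bool.false_eq_true, if_false, ite_false]
          omega

theorem altPass_fold (network : List (Int × Int)) (L : List Int)
    (hL : ∀ p ∈ network, p.1 ∈ L ∧ p.2 ∈ L) :
    ∀ (E : List (Int × Int)), (∀ p ∈ E, p ∈ network) →
    ∀ (d : PySem.Dict Int Int) (flag : Bool), labInv network L d →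
    labInv network L (E.foldl passStep (d, flag)).1
    ∧ labMeasure L (E.foldl passStep (d, flag)).1 ≤ labMeasure L d
    ∧ ((E.foldl passStep (d, flag)).2 = true →
        flag = true ∨ labMeasure L (E.foldl passStep (d, flag)).1 < labMeasure L d)
    ∧ ((E.foldl passStep (d, flag)).2 = false →
        (E.foldl passStep (d, flag)).1 = d ∧ flag = false
        ∧ ∀ p ∈ E, d.getD p.1 0 = d.getD p.2 0) := by
  intro E
  induction E with
  | nil =>
    intro _ d flag hinv
    exact ⟨hinv, le_refl _, fun h => Or.inl h, fun h => ⟨rfl, h, by simp⟩⟩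
  | cons p E ihE =>
    intro hE d flag hinv
    rw [List.foldl_cons]
    have hp : p ∈ network := hE p (List.mem_cons_self ..)
    by_cases heq : d.getD p.1 0 = d.getD p.2 0
    · have hstep : passStep (d, flag) p = (d, flag) := by
        unfold passStep
        simp [heq]
      rw [hstep]
      obtain ⟨i1, i2, i3, i4⟩ := ihE (fun q hq => hE q (List.mem_cons_of_mem _ hq)) d flag hinv
      refine ⟨i1, i2, i3, fun h => ?_⟩
      obtain ⟨j1, j2, j3⟩ := i4 h
      refine ⟨j1, j2, fun q hq => ?_⟩
      rcases List.mem_cons.1 hq with rfl | hq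
      · exact heq
      · exact j3 q hq
    · have hne : d.getD p.1 0 ≠ d.getD p.2 0 := heq
      have hstep : passStep (d, flag) p
          = ((d.insert p.1 (min (d.getD p.1 0) (d.getD p.2 0))).insert p.2
              (min (d.getD p.1 0) (d.getD p.2 0)), true) := by
        unfold passStep
        simp [hne]
      set m := min (d.getD p.1 0) (d.getD p.2 0) with hm
      set d2 := (d.insert p.1 m).insert p.2 m with hd2
      rw [hstep]
      have hp1L := (hL p hp).1
      have hp2L := (hL p hp).2
      have hla := hinv p.1 hp1L
      have hlb := hinv p.2 hp2L
      have hp12 : p.1 ≠ p.2 := fun h => hne (by rw [h])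
      have hedge : EdgeOf network p.1 p.2 := Or.inl (by rw [Prod.mk.eta]; exact hp)
      have hget2 : ∀ k, d2.getD k 0
          = if k = p.2 then m else if k = p.1 then m else d.getD k 0 := by
        intro k
        rw [hd2, PySem.Dict.getD_insert, PySem.Dict.getD_insert]
      have hConn1 : Conn network p.1 m := by
        rcases min_choice (d.getD p.1 0) (d.getD p.2 0) with h | h
        · rw [hm, h]; exact hla.2
        · rw [hm, h]; exact conn_trans (Conn.tail Conn.refl hedge) hlb.2
      have hConn2 : Conn network p.2 m := by
        rcases min_choice (d.getD p.1 0) (d.getD p.2 0) with h | h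
        · rw [hm, h]; exact conn_trans (Conn.tail Conn.refl (edgeOf_symm hedge)) hla.2
        · rw [hm, h]; exact hlb.2
      have hmL : m ∈ L := by
        rcases min_choice (d.getD p.1 0) (d.getD p.2 0) with h | h
        · rw [hm, h]; exact hla.1
        · rw [hm, h]; exact hlb.1
      have hinv2 : labInv network L d2 := by
        intro k hk
        rw [hget2 k]
        by_cases hk2 : k = p.2
        · rw [if_pos hk2]; exact ⟨hmL, hk2 ▸ hConn2⟩
        · rw [if_neg hk2]
          by_cases hk1 : k = p.1
          · rw [if_pos hk1]; exact ⟨hmL, hk1 ▸ hConn1⟩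
          · rw [if_neg hk1]; exact hinv k hk
      have hm1 : m ≤ d.getD p.1 0 := by rw [hm]; exact min_le_left _ _
      have hm2 : m ≤ d.getD p.2 0 := by rw [hm]; exact min_le_right _ _
      have hptle : ∀ k ∈ L, L.countP (fun u => decide (u < d2.getD k 0))
          ≤ L.countP (fun u => decide (u < d.getD k 0)) := by
        intro k _
        rw [hget2 k]
        by_cases hk2 : k = p.2
        · rw [if_pos hk2, hk2]
          exact List.countP_mono_left (fun u _ hu => by
            simp only [decide_eq_true_eq] at hu ⊢
            omega)
        · rw [if_neg hk2]
          by_cases hk1 : k = p.1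
          · rw [if_pos hk1, hk1]
            exact List.countP_mono_left (fun u _ hu => by
              simp only [decide_eq_true_eq] at hu ⊢
              omega)
          · rw [if_neg hk1]
      have hlt : labMeasure L d2 < labMeasure L d := by
        unfold labMeasure
        rcases lt_or_gt_of_ne hne with hlt1 | hlt1
        · refine List.sum_lt_sum _ _ hptle ⟨p.2, hp2L, ?_⟩
          rw [hget2 p.2, if_pos rfl]
          have hmm : m = d.getD p.1 0 := by rw [hm]; exact min_eq_left (le_of_lt hlt1)
          rw [hmm]
          exact countP_lt_of_lt L _ _ hlt1 hla.1
        · refine List.sum_lt_sum _ _ hptle ⟨p.1, hp1L, ?_⟩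
          rw [hget2 p.1, if_neg hp12, if_pos rfl]
          have hmm : m = d.getD p.2 0 := by rw [hm]; exact min_eq_right (le_of_lt hlt1)
          rw [hmm]
          exact countP_lt_of_lt L _ _ hlt1 hlb.1
      obtain ⟨i1, i2, i3, i4⟩ := ihE (fun q hq => hE q (List.mem_cons_of_mem _ hq)) d2 true hinv2
      refine ⟨i1, le_trans i2 (le_of_lt hlt), fun _ => Or.inr (lt_of_le_of_lt i2 hlt),
        fun h => ?_⟩
      obtain ⟨_, hcontra, _⟩ := i4 h
      exact absurd hcontra (by simp)

theorem altPass_spec (network : List (Int × Int)) (L : List Int)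
    (hL : ∀ p ∈ network, p.1 ∈ L ∧ p.2 ∈ L) :
    ∀ (d : PySem.Dict Int Int), labInv network L d →
    labInv network L (altPass network (d, false)).1
    ∧ ((altPass network (d, false)).2 = true →
        labMeasure L (altPass network (d, false)).1 < labMeasure L d)
    ∧ ((altPass network (d, false)).2 = false →
        (altPass network (d, false)).1 = d ∧ Stable network d) := by
  intro d hinv
  have hE : ∀ p ∈ network ++ network.reverse, p ∈ network := by
    intro p hp
    rcases List.mem_append.1 hp with h | h
    · exact h
    · exact List.mem_reverse.1 h
  obtain ⟨i1, i2, i3, i4⟩ := altPass_fold network L hL (network ++ network.reverse) hE d false hinv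
  rw [altPass_eq]
  refine ⟨i1, fun h => ?_, fun h => ?_⟩
  · rcases i3 h with hc | hc
    · exact absurd hc (by simp)
    · exact hc
  · obtain ⟨j1, _, j3⟩ := i4 h
    exact ⟨j1, fun p hp => j3 p (List.mem_append.2 (Or.inl hp))⟩

theorem altLoop_spec (network : List (Int × Int)) (L : List Int)
    (hL : ∀ p ∈ network, p.1 ∈ L ∧ p.2 ∈ L) :
    ∀ (fuel : Nat) (d : PySem.Dict Int Int), labInv network L d →
    labMeasure L d < fuel →
    labInv network L (altLoop network fuel d) ∧ Stable network (altLoop network fuel d) := by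
  intro fuel
  induction fuel with
  | zero => intro d _ hmu; omega
  | succ fuel ih =>
    intro d hinv hmu
    obtain ⟨i1, i2, i3⟩ := altPass_spec network L hL d hinv
    rw [altLoop]
    by_cases hflag : (altPass network (d, false)).2 = true
    · rw [if_pos hflag]
      exact ih _ i1 (lt_of_lt_of_le (i2 hflag) (Nat.lt_succ_iff.1 hmu))
    · rw [if_neg hflag]
      obtain ⟨hr, hs⟩ := i3 (by simpa using hflag)
      rw [hr]
      exact ⟨hinv, hs⟩

-- initial labels: labels0[v] = v on the node list
theorem getD_fold_insert_not_mem (M : List Int) (v : Int) (hv : v ∉ M) :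
    ∀ d : PySem.Dict Int Int, (M.foldl (fun d v => d.insert v v) d).getD v 0 = d.getD v 0 := by
  induction M with
  | nil => intro d; rfl
  | cons h M ih =>
    intro d
    rw [List.foldl_cons, ih (fun hm => hv (List.mem_cons_of_mem _ hm)),
      PySem.Dict.getD_insert, if_neg (fun he => hv (by rw [he]; exact List.mem_cons_self ..))]

theorem labels0_getD (L : List Int) (hnd : L.Nodup) :
    ∀ (d : PySem.Dict Int Int), ∀ v ∈ L,
    (L.foldl (fun d v => d.insert v v) d).getD v 0 = v := by
  induction L with
  | nil => intro d v hv; simp at hv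
  | cons h M ih =>
    intro d v hv
    rcases List.nodup_cons.1 hnd with ⟨hh, hndM⟩
    rw [List.foldl_cons]
    rcases List.mem_cons.1 hv with rfl | hv2
    · rw [getD_fold_insert_not_mem M v hh, PySem.Dict.getD_insert, if_pos rfl]
    · exact ih hndM (d.insert h h) v hv2

-- the stable labelling characterises connectivity
theorem lab_eq_of_conn (network : List (Int × Int)) (d : PySem.Dict Int Int)
    (hs : Stable network d) {x y : Int} (h : Conn network x y) :
    d.getD x 0 = d.getD y 0 := by
  induction h with
  | refl => rfl
  | tail _ he ih =>
    rcases he with he | he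
    · exact ih.trans (hs _ he)
    · exact ih.trans (hs _ he).symm

theorem conn_of_lab_eq (network : List (Int × Int)) (L : List Int)
    (d : PySem.Dict Int Int) (hinv : labInv network L d) {x y : Int}
    (hx : x ∈ L) (hy : y ∈ L) (h : d.getD x 0 = d.getD y 0) :
    Conn network x y := by
  have h1 := (hinv x hx).2
  have h2 := (hinv y hy).2
  rw [h] at h1
  exact conn_trans h1 (conn_symm h2)

-- ---- sorted canonicalisation ----

theorem sorted_congr_perm (xs ys : List Int) (h : xs.Perm ys) :
    PySem.List.sorted xs (fun x => x) = PySem.List.sorted ys (fun x => x) := by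
  refine PySem.List.eq_of_perm_of_pairwise_le_of_injective (fun x => x)
    (fun a b hab => hab) ?_ (PySem.List.sorted_pairwise ..) (PySem.List.sorted_pairwise ..)
  exact (PySem.List.sorted_perm xs _ false).trans
    (h.trans (PySem.List.sorted_perm ys _ false).symm)

-- ---- aligning A's outer loop with B's grouping ----

theorem forall₂_append_singleton {α β : Type} {P : α → β → Prop} {l₁ : List α}
    {l₂ : List β} {a : α} {b : β} (h : List.Forall₂ P l₁ l₂) (hab : P a b) :
    List.Forall₂ P (l₁ ++ [a]) (l₂ ++ [b]) := by
  induction h with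
  | nil => exact List.Forall₂.cons hab List.Forall₂.nil
  | cons hpq _ ih => exact List.Forall₂.cons hpq ih

theorem forall₂_map_eq {α β : Type} {P : α → β → Prop} (F : α → List Int)
    (G : β → List Int) (h : ∀ a b, P a b → F a = G b) :
    ∀ {l₁ : List α} {l₂ : List β}, List.Forall₂ P l₁ l₂ → l₁.map F = l₂.map G := by
  intro l₁ l₂ hf
  induction hf with
  | nil => rfl
  | cons hab _ ihm =>
    simp only [List.map_cons]
    rw [h _ _ hab, ihm]

theorem align_fold (network : List (Int × Int)) (L : List Int)
    (labels : PySem.Dict Int Int)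
    (hconnL : ∀ x ∈ L, ∀ y, Conn network x y → y ∈ L)
    (hβ : ∀ x y : Int, Conn network x y → labels.getD x 0 = labels.getD y 0)
    (hγ : ∀ x ∈ L, ∀ y ∈ L, labels.getD x 0 = labels.getD y 0 → Conn network x y) :
    ∀ (M : List Int), (∀ x ∈ M, x ∈ L) →
    ∀ (v : PySem.Set Int) (ccs : List (PySem.Set Int)) (R : PySem.Set Int),
    (∀ y, y ∈ v ↔ y ∈ L ∧ labels.getD y 0 ∈ R) → v.Nodup → ClosedSet network v →
    List.Forall₂ (fun cc r => cc.Nodup ∧ ∀ y, (y ∈ cc ↔ y ∈ L ∧ labels.getD y 0 = r)) ccs R →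
    List.Forall₂ (fun cc r => cc.Nodup ∧ ∀ y, (y ∈ cc ↔ y ∈ L ∧ labels.getD y 0 = r))
      (M.foldl (dfsStart (dfsAdj network) (2 * network.length + 1)) (v, ccs)).2
      (M.foldl (fun R x => PySem.Set.add R (labels.getD x 0)) R) := by
  intro M
  induction M with
  | nil => intro _ v ccs R _ _ _ hf; exact hf
  | cons x M ih =>
    intro hM v ccs R hv hnd hcl hf
    have hxL : x ∈ L := hM x (List.mem_cons_self ..)
    rw [List.foldl_cons, List.foldl_cons]
    by_cases hxv : x ∈ v
    · have hc1 : PySem.Set.contains v x = true := (PySem.Set.contains_iff _ _).2 hxv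
      have hs1 : dfsStart (dfsAdj network) (2 * network.length + 1) (v, ccs) x = (v, ccs) := by
        unfold dfsStart
        simp [hxv]
      have hs2 : PySem.Set.add R (labels.getD x 0) = R :=
        PySem.Set.add_of_mem ((hv x).1 hxv).2
      rw [hs1, hs2]
      exact ih (fun z hz => hM z (List.mem_cons_of_mem _ hz)) v ccs R hv hnd hcl hf
    · have hc1 : ¬ PySem.Set.contains v x = true :=
        fun h => hxv ((PySem.Set.contains_iff _ _).1 h)
      obtain ⟨hV, hC, hVnd, hCnd⟩ := dfs_component network v x hcl hnd hxv
      have hs1 : dfsStart (dfsAdj network) (2 * network.length + 1) (v, ccs) x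
          = ((dfsLoop (dfsAdj network) (2 * network.length + 1) v PySem.Set.empty [x]).1,
             ccs ++ [(dfsLoop (dfsAdj network) (2 * network.length + 1) v
               PySem.Set.empty [x]).2]) := by
        unfold dfsStart
        simp [hc1, hxv]
      have hlabnot : labels.getD x 0 ∉ R := fun hmem => hxv ((hv x).2 ⟨hxL, hmem⟩)
      have hs2 : PySem.Set.add R (labels.getD x 0) = R ++ [labels.getD x 0] :=
        PySem.Set.add_of_not_mem hlabnot
      rw [hs1, hs2]
      have hccr : ∀ y, y ∈ (dfsLoop (dfsAdj network) (2 * network.length + 1) v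
          PySem.Set.empty [x]).2 ↔ y ∈ L ∧ labels.getD y 0 = labels.getD x 0 := by
        intro y
        rw [hC y]
        constructor
        · intro hc
          exact ⟨hconnL x hxL y hc, (hβ x y hc).symm⟩
        · rintro ⟨hyL, heq⟩
          exact hγ x hxL y hyL heq.symm
      have hv' : ∀ y, y ∈ (dfsLoop (dfsAdj network) (2 * network.length + 1) v
          PySem.Set.empty [x]).1 ↔ y ∈ L ∧ labels.getD y 0 ∈ R ++ [labels.getD x 0] := by
        intro y
        rw [hV y]
        constructor
        · rintro (h | h)
          · obtain ⟨h1, h2⟩ := (hv y).1 h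
            exact ⟨h1, List.mem_append.2 (Or.inl h2)⟩
          · exact ⟨hconnL x hxL y h,
              List.mem_append.2 (Or.inr (List.mem_singleton.2 (hβ x y h).symm))⟩
        · rintro ⟨hyL, hmem⟩
          rcases List.mem_append.1 hmem with h | h
          · exact Or.inl ((hv y).2 ⟨hyL, h⟩)
          · exact Or.inr (hγ x hxL y hyL (List.mem_singleton.1 h).symm)
      have hcl' : ClosedSet network (dfsLoop (dfsAdj network) (2 * network.length + 1) v
          PySem.Set.empty [x]).1 := by
        intro z hz w hw
        rcases (hV z).1 hz with h | h
        · exact (hV w).2 (Or.inl (hcl z h w hw))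
        · exact (hV w).2 (Or.inr (Conn.tail h hw))
      exact ih (fun z hz => hM z (List.mem_cons_of_mem _ hz)) _ _ _ hv' hVnd hcl'
        (forall₂_append_singleton hf ⟨hCnd, hccr⟩)

-- ===== VERDICT (by name: the statement is the Claim_ definition above) =====
theorem dfs_spec : Claim_equal_dfs := by
  intro network _
  unfold Spec_dfs
  have hLmem : ∀ p ∈ network, p.1 ∈ PySem.Set.ofList (flatNodes network)
      ∧ p.2 ∈ PySem.Set.ofList (flatNodes network) := by
    intro p hp
    rw [PySem.Set.mem_ofList, PySem.Set.mem_ofList]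
    exact ⟨mem_flatNodes_left hp, mem_flatNodes_right hp⟩
  set L := PySem.Set.ofList (flatNodes network) with hLdef
  have hndL : L.Nodup := PySem.Set.nodup_ofList _
  have hmemL : ∀ y, y ∈ L ↔ y ∈ flatNodes network := fun y => PySem.Set.mem_ofList _ y
  have hconnL : ∀ x ∈ L, ∀ y, Conn network x y → y ∈ L := by
    intro x hx y hc
    rcases mem_flatNodes_of_conn hc with rfl | h
    · exact hx
    · exact (hmemL y).2 h
  set labels0 := L.foldl (fun d v => d.insert v v) PySem.Dict.empty with hl0
  set labels := altLoop network ((2 * network.length + 1) * (2 * network.length + 1))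
    labels0 with hlab
  have hinv0 : labInv network L labels0 := by
    intro k hk
    rw [hl0, labels0_getD L hndL PySem.Dict.empty k hk]
    exact ⟨hk, Conn.refl⟩
  have hLlen : L.length ≤ 2 * network.length := by
    have h1 := PySem.Set.length_ofList_le (flatNodes network)
    have h2 := length_flatNodes network
    rw [← hLdef] at h1
    omega
  have hmu0 : labMeasure L labels0
      < (2 * network.length + 1) * (2 * network.length + 1) := by
    have hsum : labMeasure L labels0 ≤ L.length * L.length := by
      unfold labMeasure
      calc (L.map (fun k => L.countP (fun u => decide (u < labels0.getD k 0)))).sum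
          ≤ (L.map (fun _ => L.length)).sum :=
            List.sum_le_sum (fun k _ => List.countP_le_length)
        _ = L.length * L.length := by
            rw [List.map_const']
            simp [List.sum_replicate, smul_eq_mul, Nat.mul_comm]
    have h3 : L.length * L.length ≤ (2 * network.length) * (2 * network.length) :=
      Nat.mul_le_mul hLlen hLlen
    have h4 : (2 * network.length) * (2 * network.length)
        < (2 * network.length + 1) * (2 * network.length + 1) :=
      Nat.mul_self_lt_mul_self (Nat.lt_succ_self _)
    omega
  obtain ⟨hinv, hstab⟩ := altLoop_spec network L hLmem
    ((2 * network.length + 1) * (2 * network.length + 1)) labels0 hinv0 hmu0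
  rw [← hlab] at hinv hstab
  have hβ : ∀ x y, Conn network x y → labels.getD x 0 = labels.getD y 0 :=
    fun x y hc => lab_eq_of_conn network labels hstab hc
  have hγ : ∀ x ∈ L, ∀ y ∈ L, labels.getD x 0 = labels.getD y 0 → Conn network x y :=
    fun x hx y hy h => conn_of_lab_eq network L labels hinv hx hy h
  have hkeysA : (dfsAdj network).keys = L := by rw [pv_keys]
  have hnodes : (altNodes network).2 = L := by rw [altNodes_eq]
  -- the grouping dict of port B
  set byroot := L.foldl (fun d v => d.modify (labels.getD v 0) [] (fun c => c ++ [v]))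
    PySem.Dict.empty with hbr
  have hbrkeys : byroot.keys = PySem.Set.ofList (L.map (fun v => labels.getD v 0)) := by
    rw [hbr, PySem.Dict.keys_foldl_modify_key L (fun v => labels.getD v 0) []
      (fun _ v => fun c => c ++ [v]) PySem.Dict.empty]
    rw [PySem.Dict.keys_empty, PySem.Set.update_nil_left]
  have hbrnd : byroot.keys.Nodup := by
    rw [hbrkeys]; exact PySem.Set.nodup_ofList _
  have hbrget : ∀ c : Int, byroot.getD c []
      = L.filter (fun v => labels.getD v 0 == c) := by
    intro c
    have hfm : byroot = (L.map (fun v => (labels.getD v 0, v))).foldl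
        (fun d p => d.modify p.1 [] (fun c => c ++ [p.2])) PySem.Dict.empty := by
      rw [hbr, List.foldl_map]
    rw [hfm, PySem.Dict.getD_foldl_modify_append, PySem.Dict.getD_empty, List.filter_map]
    simp [Function.comp_def]
  have hvals : byroot.values = (PySem.Set.ofList (L.map (fun v => labels.getD v 0))).map
      (fun c => L.filter (fun v => labels.getD v 0 == c)) := by
    have hitems := PySem.Dict.items_eq_map_keys byroot hbrnd []
    show byroot.items.map (fun kv => kv.2) = _
    rw [hitems, hbrkeys, List.map_map]
    refine List.map_congr_left (fun c _ => ?_)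
    simp [hbrget c]
  have halign := align_fold network L labels hconnL hβ hγ L (fun x hx => hx)
    PySem.Set.empty [] [] (by intro y; simp [PySem.Set.empty]) List.nodup_nil
    (by intro z hz; simp [PySem.Set.empty] at hz) List.Forall₂.nil
  have hroots : PySem.Set.ofList (L.map (fun v => labels.getD v 0))
      = L.foldl (fun R x => PySem.Set.add R (labels.getD x 0)) [] := by
    rw [PySem.Set.ofList_eq_foldl, List.foldl_map]
  show dfs network = dfs_alt network
  unfold dfs dfs_alt
  simp only []
  rw [hkeysA, hnodes, ← hl0, ← hlab, ← hbr, hvals, hroots, List.map_map]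
  refine forall₂_map_eq _ _ ?_ halign
  rintro cc r ⟨hccnd, hccm⟩
  have hcaA : (cc.filter (fun n => PySem.Set.contains
      (PySem.Set.ofList (network.map (fun p => p.1))) n)).Nodup := hccnd.filter _
  have hcaB : ((L.filter (fun v => labels.getD v 0 == r)).filter
      (fun n => PySem.Set.contains (PySem.Set.ofList (network.map (fun p => p.1))) n)).Nodup :=
    (hndL.filter _).filter _
  have hperm : (cc.filter (fun n => PySem.Set.contains
      (PySem.Set.ofList (network.map (fun p => p.1))) n)).Perm
      ((L.filter (fun v => labels.getD v 0 == r)).filter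
        (fun n => PySem.Set.contains (PySem.Set.ofList (network.map (fun p => p.1))) n)) := by
    refine (List.perm_ext_iff_of_nodup hcaA hcaB).2 (fun y => ?_)
    simp only [List.mem_filter, hccm y, beq_iff_eq]
  simp only [Function.comp_def]
  rw [PySem.Set.ofList_eq_self_of_nodup _ hcaA, PySem.Set.ofList_eq_self_of_nodup _ hcaB]
  exact sorted_congr_perm _ _ hperm
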